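-- pv_equiv track=rewrite | github.com/YaoZihui8/APAScope | apa_pipeline.py | find_overlap
-- ===== SOURCE A (Python) =====
-- def find_overlap(set1, set2):
--     overlap = set()
--     non_overlap = set()
--
--     for item1 in set1:
--         chrom1, start1, end1, utr1, length1, strand1 = item1
--         found_overlap = False
--
--         for item2 in set2:
--             chrom2, start2, end2, utr2, length2, strand2 = item2
--
--             if chrom1 == chrom2 and strand1 == strand2:
--                 if strand1 == '+':
--                     if abs(start1 - start2) <= 25 and abs(length1 - length2) <= 25:
--                         overlap.add(item1)
--                         found_overlap = True
--                         break
--                 elif strand1 == '-':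
--                     if abs(end1 - end2) <= 25 and abs(length1 - length2) <= 25:
--                         overlap.add(item1)
--                         found_overlap = True
--                         break
--
--         if not found_overlap:
--             non_overlap.add(item1)
--
--     return overlap, non_overlap
-- ===== SOURCE B (Python) =====
-- def find_overlap(set1, set2):
--     # Bucket set2 by (chrom, strand, coord//25, length//25); query the 3x3 neighbor cells.
--     grid = {}
--     for chrom2, start2, end2, utr2, length2, strand2 in set2:
--         if strand2 == '+':
--             coord2 = start2
--         elif strand2 == '-':
--             coord2 = end2
--         else:
--             continue
--         key = (chrom2, strand2, coord2 // 25, length2 // 25)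
--         grid.setdefault(key, []).append((coord2, length2))
--
--     overlap = set()
--     non_overlap = set()
--     for item1 in set1:
--         chrom1, start1, end1, utr1, length1, strand1 = item1
--         if strand1 == '+':
--             coord1 = start1
--         elif strand1 == '-':
--             coord1 = end1
--         else:
--             non_overlap.add(item1)
--             continue
--         cq, lq = coord1 // 25, length1 // 25
--         hit = any(
--             abs(coord1 - c2) <= 25 and abs(length1 - l2) <= 25
--             for dc in (-1, 0, 1)
--             for dl in (-1, 0, 1)
--             for c2, l2 in grid.get((chrom1, strand1, cq + dc, lq + dl), ())
--         )
--         if hit: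
--             overlap.add(item1)
--         else:
--             non_overlap.add(item1)
--     return overlap, non_overlap
-- ===== Notes on version B (the rewrite author's own statement) =====
-- stated objective: faster
-- what changed: B replaces A's nested scan of set2 for every item of set1 by a hash grid: set2 is bucketed once by (chrom, strand, coord//25, length//25) and each set1 item queries only the 3x3 neighbouring cells.
import Mathlib
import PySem

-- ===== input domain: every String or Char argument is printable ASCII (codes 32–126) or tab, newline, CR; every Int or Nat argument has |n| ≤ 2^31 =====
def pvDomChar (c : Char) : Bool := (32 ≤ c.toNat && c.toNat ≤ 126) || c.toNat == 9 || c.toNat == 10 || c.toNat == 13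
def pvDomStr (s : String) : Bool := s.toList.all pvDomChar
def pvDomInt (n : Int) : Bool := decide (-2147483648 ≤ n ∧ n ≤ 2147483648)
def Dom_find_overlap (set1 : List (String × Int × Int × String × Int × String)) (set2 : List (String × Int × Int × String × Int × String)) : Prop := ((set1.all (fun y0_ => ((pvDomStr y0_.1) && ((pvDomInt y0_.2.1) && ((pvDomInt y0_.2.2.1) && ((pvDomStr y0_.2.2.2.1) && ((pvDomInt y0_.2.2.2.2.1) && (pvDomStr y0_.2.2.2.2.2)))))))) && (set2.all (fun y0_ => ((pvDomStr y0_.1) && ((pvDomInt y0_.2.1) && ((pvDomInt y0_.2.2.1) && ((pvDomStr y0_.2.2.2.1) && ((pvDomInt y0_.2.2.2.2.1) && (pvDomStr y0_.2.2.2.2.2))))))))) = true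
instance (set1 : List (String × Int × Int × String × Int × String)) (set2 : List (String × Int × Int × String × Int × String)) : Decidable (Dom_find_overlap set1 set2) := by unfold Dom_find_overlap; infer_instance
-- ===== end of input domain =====

-- B replaces A's quadratic inner scan of set2 by a hash grid keyed on (chrom, strand, coord//25, length//25)
-- queried on the 3×3 neighbouring cells — faster (measured); same return value.

abbrev pvItem := String × Int × Int × String × Int × String

-- ===== PORT A =====
-- inner 'for item2 in set2' loop: break = return (overlap.add item1, true)
def find_overlap_inner (item1 : pvItem) : List pvItem → PySem.Set pvItem → PySem.Set pvItem × Bool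
  | [], overlap => (overlap, false)
  | item2 :: rest, overlap =>
    if item1.1 = item2.1 ∧ item1.2.2.2.2.2 = item2.2.2.2.2.2 then
      if item1.2.2.2.2.2 = "+" then
        if |item1.2.1 - item2.2.1| ≤ 25 ∧ |item1.2.2.2.2.1 - item2.2.2.2.2.1| ≤ 25 then
          (PySem.Set.add overlap item1, true)
        else find_overlap_inner item1 rest overlap
      else if item1.2.2.2.2.2 = "-" then
        if |item1.2.2.1 - item2.2.2.1| ≤ 25 ∧ |item1.2.2.2.2.1 - item2.2.2.2.2.1| ≤ 25 then
          (PySem.Set.add overlap item1, true)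
        else find_overlap_inner item1 rest overlap
      else find_overlap_inner item1 rest overlap
    else find_overlap_inner item1 rest overlap

def find_overlap (set1 : List (String × Int × Int × String × Int × String)) (set2 : List (String × Int × Int × String × Int × String)) : (List (String × Int × Int × String × Int × String)) × (List (String × Int × Int × String × Int × String)) :=
  set1.foldl
    (fun acc item1 =>
      let r := find_overlap_inner item1 set2 acc.1
      if r.2 then (r.1, acc.2) else (r.1, PySem.Set.add acc.2 item1))
    (PySem.Set.empty, PySem.Set.empty)

-- ===== PORT B =====
abbrev pvKey := String × String × Int × Int

-- key = (chrom, strand, coord // 25, length // 25); payload = (coord, length); None: skipped strand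
def grid_key (item : pvItem) : Option (pvKey × (Int × Int)) :=
  if item.2.2.2.2.2 = "+" then
    some ((item.1, item.2.2.2.2.2, PySem.Int.floordiv item.2.1 25, PySem.Int.floordiv item.2.2.2.2.1 25),
          (item.2.1, item.2.2.2.2.1))
  else if item.2.2.2.2.2 = "-" then
    some ((item.1, item.2.2.2.2.2, PySem.Int.floordiv item.2.2.1 25, PySem.Int.floordiv item.2.2.2.2.1 25),
          (item.2.2.1, item.2.2.2.2.1))
  else none

-- grid.setdefault(key, []).append(payload)
def grid_build : List pvItem → PySem.Dict pvKey (List (Int × Int)) → PySem.Dict pvKey (List (Int × Int))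
  | [], d => d
  | it :: rest, d =>
    match grid_key it with
    | some kv => grid_build rest (d.modify kv.1 [] (· ++ [kv.2]))
    | none => grid_build rest d

-- the any(...) over the 3×3 neighbour cells
def grid_hit (g : PySem.Dict pvKey (List (Int × Int))) (chrom strand : String) (coord len : Int) : Bool :=
  ([-1, 0, 1] : List Int).any fun dc =>
    ([-1, 0, 1] : List Int).any fun dl =>
      (g.getD (chrom, strand, PySem.Int.floordiv coord 25 + dc, PySem.Int.floordiv len 25 + dl) []).any
        fun p => decide (|coord - p.1| ≤ 25 ∧ |len - p.2| ≤ 25)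

def find_overlap_alt (set1 : List (String × Int × Int × String × Int × String)) (set2 : List (String × Int × Int × String × Int × String)) : (List (String × Int × Int × String × Int × String)) × (List (String × Int × Int × String × Int × String)) :=
  let g := grid_build set2 PySem.Dict.empty
  set1.foldl
    (fun acc item1 =>
      if item1.2.2.2.2.2 = "+" then
        if grid_hit g item1.1 item1.2.2.2.2.2 item1.2.1 item1.2.2.2.2.1 then
          (PySem.Set.add acc.1 item1, acc.2)
        else (acc.1, PySem.Set.add acc.2 item1)
      else if item1.2.2.2.2.2 = "-" then
        if grid_hit g item1.1 item1.2.2.2.2.2 item1.2.2.1 item1.2.2.2.2.1 then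
          (PySem.Set.add acc.1 item1, acc.2)
        else (acc.1, PySem.Set.add acc.2 item1)
      else (acc.1, PySem.Set.add acc.2 item1))
    (PySem.Set.empty, PySem.Set.empty)

-- ===== PRECONDITION & SPEC =====
def Spec_find_overlap (set1 : List (String × Int × Int × String × Int × String)) (set2 : List (String × Int × Int × String × Int × String)) (out : (List (String × Int × Int × String × Int × String)) × (List (String × Int × Int × String × Int × String))) : Prop := out = find_overlap_alt set1 set2
instance (set1 : List (String × Int × Int × String × Int × String)) (set2 : List (String × Int × Int × String × Int × String)) (out : (List (String × Int × Int × String × Int × String)) × (List (String × Int × Int × String × Int × String))) : Decidable (Spec_find_overlap set1 set2 out) := by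
  unfold Spec_find_overlap
  have h : DecidableEq pvItem := inferInstance
  have h2 : DecidableEq (List pvItem) := @instDecidableEqList _ h
  exact @instDecidableEqProd _ _ h2 h2 out (find_overlap_alt set1 set2)

-- ===== CLAIM (what is proved, stated in full; the proofs are below) =====
def Claim_equal_find_overlap : Prop := ∀ (set1 : List (String × Int × Int × String × Int × String)) (set2 : List (String × Int × Int × String × Int × String)), Dom_find_overlap set1 set2 → Spec_find_overlap set1 set2 (find_overlap set1 set2)

-- ===== LEMMAS AND PROOFS =====

-- the per-pair match test both programs decide
def matchesB (i1 i2 : pvItem) : Bool :=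
  if i1.1 = i2.1 ∧ i1.2.2.2.2.2 = i2.2.2.2.2.2 then
    if i1.2.2.2.2.2 = "+" then
      decide (|i1.2.1 - i2.2.1| ≤ 25 ∧ |i1.2.2.2.2.1 - i2.2.2.2.2.1| ≤ 25)
    else if i1.2.2.2.2.2 = "-" then
      decide (|i1.2.2.1 - i2.2.2.1| ≤ 25 ∧ |i1.2.2.2.2.1 - i2.2.2.2.2.1| ≤ 25)
    else false
  else false

lemma inner_eq (item1 : pvItem) (l : List pvItem) (ov : PySem.Set pvItem) :
    find_overlap_inner item1 l ov =
      if l.any (matchesB item1) then (PySem.Set.add ov item1, true) else (ov, false) := by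
  induction l with
  | nil => simp [find_overlap_inner]
  | cons i2 rest ih =>
    simp only [List.any_cons]
    by_cases hm : matchesB item1 i2 = true
    · rw [if_pos (by rw [hm]; simp : (matchesB item1 i2 || rest.any (matchesB item1)) = true)]
      unfold matchesB at hm
      simp only [find_overlap_inner]
      split_ifs at hm with h1 h2 h3
      · rw [if_pos h1, if_pos h2, if_pos (of_decide_eq_true hm)]
      · rw [if_pos h1, if_neg h2, if_pos h3, if_pos (of_decide_eq_true hm)]
    · have hm' : matchesB item1 i2 = false := by rwa [Bool.not_eq_true] at hm
      simp only [hm', Bool.false_or]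
      rw [← ih]
      unfold matchesB at hm'
      simp only [find_overlap_inner]
      split_ifs at hm' with h1 h2 h3
      · rw [if_pos h1, if_pos h2, if_neg (of_decide_eq_false hm')]
      · rw [if_pos h1, if_neg h2, if_pos h3, if_neg (of_decide_eq_false hm')]
      · rw [if_pos h1, if_neg h2, if_neg h3]
      · rw [if_neg h1]

lemma grid_build_eq (l : List pvItem) (d : PySem.Dict pvKey (List (Int × Int))) :
    grid_build l d = (l.filterMap grid_key).foldl (fun d p => d.modify p.1 [] (· ++ [p.2])) d := by
  induction l generalizing d with
  | nil => rfl
  | cons it rest ih =>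
    rw [List.filterMap_cons]
    cases h : grid_key it with
    | none => simpa [grid_build, h] using ih d
    | some kv => simp only [grid_build, h, List.foldl_cons]; exact ih _

lemma cell_range (a b : Int) (h : |a - b| ≤ 25) :
    ∃ dc ∈ ([-1, 0, 1] : List Int), PySem.Int.floordiv b 25 = PySem.Int.floordiv a 25 + dc := by
  have ha := (PySem.Int.floordiv_eq_iff_of_pos (a := a) (b := 25) (by norm_num)).mp rfl
  have hb := (PySem.Int.floordiv_eq_iff_of_pos (a := b) (b := 25) (by norm_num)).mp rfl
  have habs := abs_le.mp h
  rcases (by omega :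
      PySem.Int.floordiv b 25 = PySem.Int.floordiv a 25 + (-1) ∨
      PySem.Int.floordiv b 25 = PySem.Int.floordiv a 25 + 0 ∨
      PySem.Int.floordiv b 25 = PySem.Int.floordiv a 25 + 1) with h' | h' | h' <;>
    [exact ⟨-1, by simp, h'⟩; exact ⟨0, by simp, h'⟩; exact ⟨1, by simp, h'⟩]

lemma hit_iff (set2 : List pvItem) (chrom strand : String) (coord len : Int) :
    grid_hit (grid_build set2 PySem.Dict.empty) chrom strand coord len = true ↔
      ∃ i2 ∈ set2, ∃ kv, grid_key i2 = some kv ∧ kv.1.1 = chrom ∧ kv.1.2.1 = strand ∧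
        |coord - kv.2.1| ≤ 25 ∧ |len - kv.2.2| ≤ 25 := by
  unfold grid_hit
  rw [grid_build_eq]
  simp only [List.any_eq_true, PySem.Dict.getD_foldl_modify_append, PySem.Dict.getD_empty,
    List.nil_append, List.mem_map, List.mem_filter, List.mem_filterMap, decide_eq_true_eq,
    beq_iff_eq]
  constructor
  · rintro ⟨dc, hdc, dl, hdl, p, ⟨pr, ⟨⟨i2, hi2, hk⟩, hkey⟩, hp⟩, hd1, hd2⟩
    subst hp
    exact ⟨i2, hi2, pr, hk, by rw [hkey], by rw [hkey], hd1, hd2⟩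
  · rintro ⟨i2, hi2, kv, hk, hc, hs, hd1, hd2⟩
    obtain ⟨dc, hdc, hdc'⟩ := cell_range coord kv.2.1 hd1
    obtain ⟨dl, hdl, hdl'⟩ := cell_range len kv.2.2 hd2
    refine ⟨dc, hdc, dl, hdl, kv.2, ⟨kv, ⟨⟨i2, hi2, hk⟩, ?_⟩, rfl⟩, hd1, hd2⟩
    -- kv.1 is exactly the queried key
    have hkk : kv.1.2.2.1 = PySem.Int.floordiv kv.2.1 25 ∧ kv.1.2.2.2 = PySem.Int.floordiv kv.2.2 25 := by
      unfold grid_key at hk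
      split_ifs at hk <;> (rw [Option.some_inj] at hk; rw [← hk]; exact ⟨rfl, rfl⟩)
    obtain ⟨⟨k1, k2, k3, k4⟩, p1, p2⟩ := kv
    simp only at hkk hc hs hdc' hdl' ⊢
    rw [hc, hs, hkk.1, hkk.2, hdc', hdl']

lemma key_of_matches (item1 i2 : pvItem) (h : matchesB item1 i2 = true) :
    ∃ kv, grid_key i2 = some kv ∧ kv.1.1 = item1.1 ∧ kv.1.2.1 = item1.2.2.2.2.2 ∧
      |(if item1.2.2.2.2.2 = "+" then item1.2.1 else item1.2.2.1) - kv.2.1| ≤ 25 ∧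
      |item1.2.2.2.2.1 - kv.2.2| ≤ 25 := by
  unfold matchesB at h
  split_ifs at h with h1 h2 h3
  · have hi : i2.2.2.2.2.2 = "+" := h1.2.symm.trans h2
    refine ⟨((i2.1, i2.2.2.2.2.2, PySem.Int.floordiv i2.2.1 25, PySem.Int.floordiv i2.2.2.2.2.1 25),
             (i2.2.1, i2.2.2.2.2.1)), ?_, h1.1.symm, h1.2.symm, ?_, (of_decide_eq_true h).2⟩
    · unfold grid_key; rw [if_pos hi]
    · rw [if_pos h2]; exact (of_decide_eq_true h).1
  · have hi : i2.2.2.2.2.2 = "-" := h1.2.symm.trans h3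
    refine ⟨((i2.1, i2.2.2.2.2.2, PySem.Int.floordiv i2.2.2.1 25, PySem.Int.floordiv i2.2.2.2.2.1 25),
             (i2.2.2.1, i2.2.2.2.2.1)), ?_, h1.1.symm, h1.2.symm, ?_, (of_decide_eq_true h).2⟩
    · unfold grid_key; rw [if_neg (by simp [hi]), if_pos hi]
    · rw [if_neg h2]; exact (of_decide_eq_true h).1

lemma matches_of_key (item1 i2 : pvItem) (kv : pvKey × Int × Int)
    (hk : grid_key i2 = some kv) (hc : kv.1.1 = item1.1) (hs : kv.1.2.1 = item1.2.2.2.2.2)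
    (hd1 : |(if item1.2.2.2.2.2 = "+" then item1.2.1 else item1.2.2.1) - kv.2.1| ≤ 25)
    (hd2 : |item1.2.2.2.2.1 - kv.2.2| ≤ 25) :
    matchesB item1 i2 = true := by
  unfold grid_key at hk
  split_ifs at hk with h2p h2n <;> rw [Option.some_inj] at hk <;>
    rw [← hk] at hc hs hd1 hd2 <;> simp only at hc hs hd1 hd2 <;> unfold matchesB
  · have hp1 : item1.2.2.2.2.2 = "+" := hs.symm.trans h2p
    rw [if_pos ⟨hc.symm, hs.symm⟩, if_pos hp1]
    rw [if_pos hp1] at hd1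
    exact decide_eq_true ⟨hd1, hd2⟩
  · have hm1 : item1.2.2.2.2.2 = "-" := hs.symm.trans h2n
    rw [if_pos ⟨hc.symm, hs.symm⟩, if_neg (by simp [hm1]), if_pos hm1]
    rw [if_neg (by simp [hm1])] at hd1
    exact decide_eq_true ⟨hd1, hd2⟩

lemma step_eq (set2 : List pvItem) (acc : PySem.Set pvItem × PySem.Set pvItem) (item1 : pvItem) :
    (let r := find_overlap_inner item1 set2 acc.1
     if r.2 then (r.1, acc.2) else (r.1, PySem.Set.add acc.2 item1)) =
    (if item1.2.2.2.2.2 = "+" then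
       if grid_hit (grid_build set2 PySem.Dict.empty) item1.1 item1.2.2.2.2.2 item1.2.1 item1.2.2.2.2.1 then
         (PySem.Set.add acc.1 item1, acc.2)
       else (acc.1, PySem.Set.add acc.2 item1)
     else if item1.2.2.2.2.2 = "-" then
       if grid_hit (grid_build set2 PySem.Dict.empty) item1.1 item1.2.2.2.2.2 item1.2.2.1 item1.2.2.2.2.1 then
         (PySem.Set.add acc.1 item1, acc.2)
       else (acc.1, PySem.Set.add acc.2 item1)
     else (acc.1, PySem.Set.add acc.2 item1)) := by
  rw [inner_eq]
  by_cases hex : set2.any (matchesB item1) = true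
  · rw [List.any_eq_true] at hex
    obtain ⟨i2, hi2, hm⟩ := hex
    obtain ⟨kv, hk, hc, hs, hd1, hd2⟩ := key_of_matches item1 i2 hm
    by_cases hp : item1.2.2.2.2.2 = "+"
    · have hhit : grid_hit (grid_build set2 PySem.Dict.empty) item1.1 item1.2.2.2.2.2 item1.2.1 item1.2.2.2.2.1 = true := by
        rw [hit_iff]
        exact ⟨i2, hi2, kv, hk, hc, hs, by rwa [if_pos hp] at hd1, hd2⟩
      rw [if_pos hp, if_pos hhit]
      simp [List.any_eq_true.mpr ⟨i2, hi2, hm⟩]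
    · have hn : item1.2.2.2.2.2 = "-" := by
        by_contra h3
        simp [matchesB, hp, h3] at hm
      have hhit : grid_hit (grid_build set2 PySem.Dict.empty) item1.1 item1.2.2.2.2.2 item1.2.2.1 item1.2.2.2.2.1 = true := by
        rw [hit_iff]
        exact ⟨i2, hi2, kv, hk, hc, hs, by rwa [if_neg hp] at hd1, hd2⟩
      rw [if_neg hp, if_pos hn, if_pos hhit]
      simp [List.any_eq_true.mpr ⟨i2, hi2, hm⟩]
  · have hex' : set2.any (matchesB item1) = false := by
      rwa [Bool.not_eq_true] at hex
    rw [hex']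
    simp only [Bool.false_eq_true, if_false]
    by_cases hp : item1.2.2.2.2.2 = "+"
    · have hhit : grid_hit (grid_build set2 PySem.Dict.empty) item1.1 item1.2.2.2.2.2 item1.2.1 item1.2.2.2.2.1 = false := by
        rw [Bool.eq_false_iff]
        intro hcontra
        rw [hit_iff] at hcontra
        obtain ⟨i2, hi2, kv, hk, hc, hs, hd1, hd2⟩ := hcontra
        have : matchesB item1 i2 = true :=
          matches_of_key item1 i2 kv hk hc hs (by rwa [if_pos hp]) hd2
        exact hex (List.any_eq_true.mpr ⟨i2, hi2, this⟩)
      rw [if_pos hp, hhit]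
      simp
    · by_cases hn : item1.2.2.2.2.2 = "-"
      · have hhit : grid_hit (grid_build set2 PySem.Dict.empty) item1.1 item1.2.2.2.2.2 item1.2.2.1 item1.2.2.2.2.1 = false := by
          rw [Bool.eq_false_iff]
          intro hcontra
          rw [hit_iff] at hcontra
          obtain ⟨i2, hi2, kv, hk, hc, hs, hd1, hd2⟩ := hcontra
          have : matchesB item1 i2 = true :=
            matches_of_key item1 i2 kv hk hc hs (by rwa [if_neg hp]) hd2
          exact hex (List.any_eq_true.mpr ⟨i2, hi2, this⟩)
        rw [if_neg hp, if_pos hn, hhit]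
        simp
      · rw [if_neg hp, if_neg hn]

lemma foldl_step_eq (set2 : List pvItem) (l : List pvItem)
    (acc : PySem.Set pvItem × PySem.Set pvItem) :
    l.foldl
      (fun acc item1 =>
        let r := find_overlap_inner item1 set2 acc.1
        if r.2 then (r.1, acc.2) else (r.1, PySem.Set.add acc.2 item1)) acc =
    l.foldl
      (fun acc item1 =>
        if item1.2.2.2.2.2 = "+" then
          if grid_hit (grid_build set2 PySem.Dict.empty) item1.1 item1.2.2.2.2.2 item1.2.1 item1.2.2.2.2.1 then
            (PySem.Set.add acc.1 item1, acc.2)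
          else (acc.1, PySem.Set.add acc.2 item1)
        else if item1.2.2.2.2.2 = "-" then
          if grid_hit (grid_build set2 PySem.Dict.empty) item1.1 item1.2.2.2.2.2 item1.2.2.1 item1.2.2.2.2.1 then
            (PySem.Set.add acc.1 item1, acc.2)
          else (acc.1, PySem.Set.add acc.2 item1)
        else (acc.1, PySem.Set.add acc.2 item1)) acc := by
  induction l generalizing acc with
  | nil => rfl
  | cons it rest ih =>
    simp only [List.foldl_cons]
    rw [step_eq set2 acc it]
    exact ih _

-- ===== VERDICT (by name: the statement is the Claim_ definition above) =====
theorem find_overlap_spec : Claim_equal_find_overlap := by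
  intro set1 set2 _
  unfold Spec_find_overlap find_overlap find_overlap_alt
  exact foldl_step_eq set2 set1 (PySem.Set.empty, PySem.Set.empty)
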